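-- pv_equiv track=rewrite | github.com/Zzxmh/HypEReg-Transmorph | draft/build_arxiv_tex.py | replace_abbreviations_mdpi
-- ===== SOURCE A (Python) =====
-- def _extract_braced(src: str, start_open: int) -> tuple[str, int]:
--     """Return (inner, index_after_closing_brace). start_open points at '{'."""
--     if start_open < 0 or start_open >= len(src) or src[start_open] != "{":
--         raise ValueError("expected '{'")
--     depth = 0
--     for i in range(start_open, len(src)):
--         if src[i] == "{":
--             depth += 1
--         elif src[i] == "}":
--             depth -= 1
--             if depth == 0:
--                 return src[start_open + 1 : i], i + 1
--     raise ValueError("unbalanced braces")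
--
-- def replace_abbreviations_mdpi(body: str) -> str:
--     """\\abbreviations{Title}{Body} -> \\section*{Title}\\n\\nBody"""
--     key = "\\abbreviations{"
--     out: list[str] = []
--     i = 0
--     while i < len(body):
--         j = body.find(key, i)
--         if j == -1:
--             out.append(body[i:])
--             break
--         out.append(body[i:j])
--         # \abbreviations{Title}{Body}
--         open_title = j + len(key) - 1
--         title, p1 = _extract_braced(body, open_title)
--         if p1 >= len(body) or body[p1] != "{":
--             raise ValueError("abbreviations: missing second argument")
--         inner, p2 = _extract_braced(body, p1)
--         out.append(f"\\section*{{{title}}}\n\n{inner}")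
--         i = p2
--     return "".join(out)
-- ===== SOURCE B (Python) =====
-- def _capture(s: str, i: int) -> tuple[str, int]:
--     """s[i] must be '{'; read the group char by char with a depth counter.
--     Return (content, index just past the matching '}')."""
--     depth = 1
--     i += 1
--     buf = []
--     while i < len(s):
--         c = s[i]
--         if c == "{":
--             depth += 1
--         elif c == "}":
--             depth -= 1
--             if depth == 0:
--                 return "".join(buf), i + 1
--         buf.append(c)
--         i += 1
--     raise ValueError("unbalanced braces")
--
-- def replace_abbreviations_mdpi(body: str) -> str:
--     """\\abbreviations{Title}{Body} -> \\section*{Title}\\n\\nBody"""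
--     key = "\\abbreviations{"
--     out = []
--     i = 0
--     while i < len(body):
--         if body.startswith(key, i):
--             title, i = _capture(body, i + len(key) - 1)
--             if i >= len(body) or body[i] != "{":
--                 raise ValueError("abbreviations: missing second argument")
--             inner, i = _capture(body, i)
--             out.append("\\section*{" + title + "}\n\n" + inner)
--         else:
--             out.append(body[i])
--             i += 1
--     return "".join(out)
-- ===== Notes on version B (the rewrite author's own statement) =====
-- stated objective: alternative
-- what changed: A repeatedly calls str.find and an index-returning slice helper (_extract_braced with depth starting at 0) to cut out regions; B is a single forward character-level state machine that copies characters one at a time and, on matching the key prefix, captures each brace group char by char with an inline depth-1 counter, never using find or slicing.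
import Mathlib
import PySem

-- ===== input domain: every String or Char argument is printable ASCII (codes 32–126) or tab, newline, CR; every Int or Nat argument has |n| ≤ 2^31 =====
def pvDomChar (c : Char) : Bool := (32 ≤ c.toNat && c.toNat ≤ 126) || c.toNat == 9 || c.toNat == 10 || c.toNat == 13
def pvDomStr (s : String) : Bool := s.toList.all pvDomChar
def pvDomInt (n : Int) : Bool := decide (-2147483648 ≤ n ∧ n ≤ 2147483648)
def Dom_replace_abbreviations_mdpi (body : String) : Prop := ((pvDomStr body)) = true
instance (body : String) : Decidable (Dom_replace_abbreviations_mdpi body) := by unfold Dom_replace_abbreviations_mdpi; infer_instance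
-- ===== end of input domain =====

-- B replaces A's find+slice scanning by a single character-level state machine (objective: alternative); same values, same ValueError points (excluded by Pre_).

def pvKey : List Char := ['\\','a','b','b','r','e','v','i','a','t','i','o','n','s','{']

-- ===== PORT A =====
-- the for-loop of _extract_braced: returns the index of the matching '}' (depth hits 0).
-- The Nat argument is pure fuel (a structural totality guard; callers pass enough that it never runs out).
def extractLoop (src : List Char) : Nat → Nat → Int → Option Nat
  | 0, _, _ => none
  | fuel+1, i, depth =>
    if i < src.length then
      if src[i]! = '{' then extractLoop src fuel (i+1) (depth+1)
      else if src[i]! = '}' then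
        if depth - 1 = 0 then some i else extractLoop src fuel (i+1) (depth-1)
      else extractLoop src fuel (i+1) depth
    else none   -- 'unbalanced braces' ValueError

-- _extract_braced (callers pass a nonnegative index, so the index is a Nat here)
def extractBraced (src : List Char) (startOpen : Nat) : Option (List Char × Nat) :=
  if startOpen < src.length ∧ src[startOpen]! = '{' then  -- else ValueError "expected '{'"
    match extractLoop src (src.length + 2) startOpen 0 with
    | some i => some ((src.drop (startOpen+1)).take (i - (startOpen+1)), i+1)  -- src[start_open+1 : i]
    | none => none
  else none

-- the while-loop of A; out.append/"".join become list appends on the result.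
-- Again the first Nat is fuel only (the index advances by at least one per iteration).
def loopA (src : List Char) : Nat → Nat → Option (List Char)
  | 0, _ => none
  | fuel+1, i =>
    if i < src.length then
      let j := PySem.Chars.findFrom src pvKey (i : Int) none   -- body.find(key, i)
      if j = -1 then some (src.drop i)                         -- out.append(body[i:]); break
      else
        let pre := (src.drop i).take (j.toNat - i)             -- body[i:j]
        match extractBraced src (j.toNat + 15 - 1) with        -- open_title = j + len(key) - 1
        | none => none
        | some (title, p1) =>
          if p1 < src.length ∧ src[p1]! = '{' then             -- negation raises 'missing second argument'
            match extractBraced src p1 with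
            | none => none
            | some (inner, p2) =>
              match loopA src fuel p2 with
              | none => none
              | some rest =>
                some (pre ++ ("\\section*{".toList ++ title ++ "}\n\n".toList ++ inner) ++ rest)
          else none
    else some []
termination_by structural fuel _ => fuel

def replace_abbreviations_mdpi (body : String) : String :=
  String.ofList ((loopA body.toList (body.toList.length + 1) 0).getD [])

-- ===== PORT B =====
-- the while-loop of _capture: chars accumulated in buf, depth counter; first Nat is fuel only
def captureLoop (src : List Char) : Nat → Nat → Int → List Char → Option (List Char × Nat)
  | 0, _, _, _ => none
  | fuel+1, i, depth, buf =>
    if i < src.length then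
      if src[i]! = '{' then captureLoop src fuel (i+1) (depth+1) (buf ++ [src[i]!])
      else if src[i]! = '}' then
        if depth - 1 = 0 then some (buf, i+1)
        else captureLoop src fuel (i+1) (depth-1) (buf ++ [src[i]!])
      else captureLoop src fuel (i+1) depth (buf ++ [src[i]!])
    else none   -- 'unbalanced braces' ValueError
termination_by structural fuel _ _ _ => fuel

-- the while-loop of B; body.startswith(key, i) is pvKey.isPrefixOf on the suffix (exact: ASCII lists);
-- first Nat is fuel only (the index advances by at least one per iteration)
def loopB (src : List Char) : Nat → Nat → Option (List Char)
  | 0, _ => none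
  | fuel+1, i =>
    if i < src.length then
      if pvKey.isPrefixOf (src.drop i) then
        match captureLoop src (src.length + 1) (i + 15) 1 [] with   -- _capture(body, i + len(key) - 1): depth=1, i+=1
        | none => none
        | some (title, i2) =>
          if i2 < src.length ∧ src[i2]! = '{' then                  -- negation raises 'missing second argument'
            match captureLoop src (src.length + 1) (i2 + 1) 1 [] with   -- _capture(body, i2)
            | none => none
            | some (inner, i3) =>
              match loopB src fuel i3 with
              | none => none
              | some rest =>
                some (("\\section*{".toList ++ title ++ "}\n\n".toList ++ inner) ++ rest)
          else none
      else
        match loopB src fuel (i+1) with                             -- out.append(body[i]); i += 1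
        | none => none
        | some rest => some (src[i]! :: rest)
    else some []
termination_by structural fuel _ => fuel

def replace_abbreviations_mdpi_alt (body : String) : String :=
  String.ofList ((loopB body.toList (body.toList.length + 1) 0).getD [])

-- ===== PRECONDITION & SPEC =====
-- state of the Pre_ recognizer: scanning / skipping the rest of the key /
-- inside the first or second brace group at depth d / expecting the second '{'
inductive PvMode : Type
  | scan : PvMode
  | skip : Nat → PvMode
  | grp : Bool → Nat → PvMode
  | expectOpen : PvMode
deriving DecidableEq, Repr

-- one left-to-right pass, one character per step (structural, so `decide` can evaluate it)
def pvRun : List Char → PvMode → Bool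
  | [], m => m = PvMode.scan
  | c :: t, m =>
    match m with
    | PvMode.scan =>
      if pvKey.isPrefixOf (c :: t) then pvRun t (PvMode.skip 14) else pvRun t PvMode.scan
    | PvMode.skip k =>
      if k = 1 then pvRun t (PvMode.grp true 1) else pvRun t (PvMode.skip (k - 1))
    | PvMode.grp first d =>
      if c = '{' then pvRun t (PvMode.grp first (d + 1))
      else if c = '}' then
        if d = 1 then (if first then pvRun t PvMode.expectOpen else pvRun t PvMode.scan)
        else pvRun t (PvMode.grp first (d - 1))
      else pvRun t (PvMode.grp first d)
    | PvMode.expectOpen =>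
      if c = '{' then pvRun t (PvMode.grp false 1) else false

-- Pre_ = exactly the bodies on which A returns (no ValueError): every occurrence of
-- '\abbreviations{' (scanning left to right, never inside an already consumed argument)
-- is followed by two brace-balanced '{...}' argument groups.
def Pre_replace_abbreviations_mdpi (body : String) : Prop := pvRun body.toList PvMode.scan = true
instance (body : String) : Decidable (Pre_replace_abbreviations_mdpi body) := by
  unfold Pre_replace_abbreviations_mdpi; infer_instance

def pvWitness_replace_abbreviations_mdpi : String := "x \\abbreviations{A{B}C}{body} y"

def Spec_replace_abbreviations_mdpi (body : String) (out : String) : Prop := out = replace_abbreviations_mdpi_alt body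
instance (body : String) (out : String) : Decidable (Spec_replace_abbreviations_mdpi body out) := by unfold Spec_replace_abbreviations_mdpi; infer_instance

-- ===== CLAIM (what is proved, stated in full; the proofs are below) =====
def Claim_equal_replace_abbreviations_mdpi : Prop := ∀ (body : String), Dom_replace_abbreviations_mdpi body → Pre_replace_abbreviations_mdpi body → Spec_replace_abbreviations_mdpi body (replace_abbreviations_mdpi body)

-- ===== LEMMAS AND PROOFS =====

theorem extractLoop_bounds (src : List Char) :
    ∀ (fuel i : Nat) (depth : Int) (i' : Nat),
      extractLoop src fuel i depth = some i' → i ≤ i' ∧ i' < src.length := by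
  intro fuel
  induction fuel with
  | zero => intro i depth i' h; simp [extractLoop] at h
  | succ f ih =>
    intro i depth i' h
    rw [extractLoop] at h
    by_cases hi : i < src.length
    · rw [if_pos hi] at h
      by_cases h1 : src[i]! = '{'
      · rw [if_pos h1] at h
        have := ih (i+1) (depth+1) i' h
        omega
      · rw [if_neg h1] at h
        by_cases h2 : src[i]! = '}'
        · rw [if_pos h2] at h
          by_cases h3 : depth - 1 = 0
          · rw [if_pos h3] at h
            simp at h
            omega
          · rw [if_neg h3] at h
            have := ih (i+1) (depth-1) i' h
            omega
        · rw [if_neg h2] at h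
          have := ih (i+1) depth i' h
          omega
    · rw [if_neg hi] at h
      simp at h

theorem infix_iff_exists_drop {α : Type} (l₁ l₂ : List α) : l₁ <:+: l₂ ↔ ∃ j, l₁ <+: l₂.drop j := by
  constructor
  · rintro ⟨s, t, rfl⟩
    exact ⟨s.length, by simp [List.append_assoc]⟩
  · rintro ⟨j, h⟩
    exact h.isInfix.trans (List.drop_suffix j l₂).isInfix

theorem findFrom_at (src : List Char) (i : Nat) (hi : i ≤ src.length)
    (hk : pvKey <+: src.drop i) :
    PySem.Chars.findFrom src pvKey (i : Int) none = (i : Int) := by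
  have hne : PySem.Chars.findFrom src pvKey (i : Int) ≠ -1 := by
    rw [Ne, PySem.Chars.findFrom_natCast_eq_neg_one_iff src pvKey i hi]
    exact fun h => h hk.isInfix
  obtain ⟨h1, h2, h3⟩ := PySem.Chars.findFrom_natCast_spec src pvKey i hi hne
  by_contra hne2
  have hlt : i < (PySem.Chars.findFrom src pvKey (i : Int)).toNat := by omega
  exact h3 i le_rfl hlt hk

theorem findFrom_step (src : List Char) (i : Nat) (hi : i < src.length)
    (hk : ¬ pvKey <+: src.drop i) :
    PySem.Chars.findFrom src pvKey (i : Int) none = PySem.Chars.findFrom src pvKey ((i + 1 : Nat) : Int) none := by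
  have hsuf : src.drop (i+1) <:+: src.drop i := by
    have : (src.drop i).drop 1 = src.drop (i+1) := by rw [List.drop_drop]
    exact this ▸ (List.drop_suffix 1 (src.drop i)).isInfix
  by_cases hinf : pvKey <:+: src.drop (i+1)
  · have h2 : PySem.Chars.findFrom src pvKey ((i+1 : Nat) : Int) ≠ -1 := by
      rw [Ne, PySem.Chars.findFrom_natCast_eq_neg_one_iff src pvKey (i+1) (by omega)]
      simpa using hinf
    have h1 : PySem.Chars.findFrom src pvKey (i : Int) ≠ -1 := by
      rw [Ne, PySem.Chars.findFrom_natCast_eq_neg_one_iff src pvKey i (by omega)]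
      exact fun h => h (hinf.trans hsuf)
    obtain ⟨ha1, ha2, ha3⟩ := PySem.Chars.findFrom_natCast_spec src pvKey i (by omega) h1
    obtain ⟨hb1, hb2, hb3⟩ := PySem.Chars.findFrom_natCast_spec src pvKey (i+1) (by omega) h2
    set a := PySem.Chars.findFrom src pvKey (i : Int) with hadef
    set b := PySem.Chars.findFrom src pvKey ((i+1 : Nat) : Int) with hbdef
    have hai : i < a.toNat := by
      rcases Nat.lt_or_ge i a.toNat with h | h
      · exact h
      · have : a.toNat = i := by omega
        exact absurd (this ▸ ha2) hk
    have hab : a.toNat = b.toNat := by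
      rcases Nat.lt_trichotomy a.toNat b.toNat with h | h | h
      · exact absurd ha2 (hb3 a.toNat (by omega) h)
      · exact h
      · exact absurd hb2 (ha3 b.toNat (by omega) h)
    omega
  · have h2 : PySem.Chars.findFrom src pvKey ((i+1 : Nat) : Int) = -1 := by
      rw [PySem.Chars.findFrom_natCast_eq_neg_one_iff src pvKey (i+1) (by omega)]
      exact hinf
    have h1 : PySem.Chars.findFrom src pvKey (i : Int) = -1 := by
      rw [PySem.Chars.findFrom_natCast_eq_neg_one_iff src pvKey i (by omega)]
      intro hin
      obtain ⟨j, hj⟩ := (infix_iff_exists_drop pvKey (src.drop i)).mp hin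
      rw [List.drop_drop] at hj
      cases j with
      | zero => exact hk (by simpa using hj)
      | succ j' =>
        refine hinf ((infix_iff_exists_drop pvKey (src.drop (i+1))).mpr ⟨j', ?_⟩)
        rw [List.drop_drop]
        have : i + 1 + j' = i + (j' + 1) := by omega
        rw [this]; exact hj
    rw [h1, h2]

-- B's char-by-char capture computes exactly A's (slice, index) pair, at equal fuel
theorem cap_ext (src : List Char) :
    ∀ (fuel i : Nat) (d : Int) (buf : List Char),
      captureLoop src fuel i d buf
        = (extractLoop src fuel i d).map (fun i' => (buf ++ (src.drop i).take (i' - i), i' + 1)) := by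
  intro fuel
  induction fuel with
  | zero => intro i d buf; rw [captureLoop, extractLoop]; simp
  | succ f ih =>
    intro i d buf
    rw [captureLoop, extractLoop]
    by_cases hi : i < src.length
    · rw [if_pos hi, if_pos hi]
      by_cases h1 : src[i]! = '{'
      · rw [if_pos h1, if_pos h1, ih (i+1) (d+1) (buf ++ [src[i]!])]
        cases h' : extractLoop src f (i+1) (d+1) with
        | none => simp
        | some i' =>
          have hb := extractLoop_bounds src f (i+1) (d+1) i' h'
          have htake : (src.drop i).take (i' - i) = src[i] :: (src.drop (i+1)).take (i' - (i+1)) := by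
            rw [List.drop_eq_getElem_cons hi]
            have h5 : i' - i = (i' - (i+1)) + 1 := by omega
            rw [h5, List.take_succ_cons]
          simp [htake, getElem!_pos src i hi]
      · rw [if_neg h1, if_neg h1]
        by_cases h2 : src[i]! = '}'
        · rw [if_pos h2, if_pos h2]
          by_cases h3 : d - 1 = 0
          · rw [if_pos h3, if_pos h3]
            simp
          · rw [if_neg h3, if_neg h3, ih (i+1) (d-1) (buf ++ [src[i]!])]
            cases h' : extractLoop src f (i+1) (d-1) with
            | none => simp
            | some i' =>
              have hb := extractLoop_bounds src f (i+1) (d-1) i' h'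
              have htake : (src.drop i).take (i' - i) = src[i] :: (src.drop (i+1)).take (i' - (i+1)) := by
                rw [List.drop_eq_getElem_cons hi]
                have h5 : i' - i = (i' - (i+1)) + 1 := by omega
                rw [h5, List.take_succ_cons]
              simp [htake, getElem!_pos src i hi]
        · rw [if_neg h2, if_neg h2, ih (i+1) d (buf ++ [src[i]!])]
          cases h' : extractLoop src f (i+1) d with
          | none => simp
          | some i' =>
            have hb := extractLoop_bounds src f (i+1) d i' h'
            have htake : (src.drop i).take (i' - i) = src[i] :: (src.drop (i+1)).take (i' - (i+1)) := by
              rw [List.drop_eq_getElem_cons hi]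
              have h5 : i' - i = (i' - (i+1)) + 1 := by omega
              rw [h5, List.take_succ_cons]
            simp [htake, getElem!_pos src i hi]
    · rw [if_neg hi, if_neg hi]
      simp

theorem extractBraced_eq_capture (src : List Char) (s : Nat) (hs : s < src.length)
    (hc : src[s]! = '{') :
    extractBraced src s = captureLoop src (src.length + 1) (s+1) 1 [] := by
  unfold extractBraced
  rw [if_pos ⟨hs, hc⟩]
  have hstep : extractLoop src (src.length + 2) s 0 = extractLoop src (src.length + 1) (s+1) 1 := by
    rw [extractLoop, if_pos hs, if_pos hc]
    norm_num
  rw [hstep, cap_ext src (src.length + 1) (s+1) 1 []]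
  cases h' : extractLoop src (src.length + 1) (s+1) 1 <;> simp

theorem prefix_head_brace (src : List Char) (i : Nat) (hk : pvKey.isPrefixOf (src.drop i)) :
    i + 14 < src.length ∧ src[i+14]! = '{' := by
  have hp : pvKey <+: src.drop i := List.isPrefixOf_iff_prefix.mp hk
  have hlen : 15 ≤ (src.drop i).length := by
    have := hp.length_le; simpa [pvKey] using this
  have hlen2 : i + 14 < src.length := by simp at hlen; omega
  have hg : (src.drop i)[14]'(by simp at hlen ⊢; omega) = pvKey[14]'(by simp [pvKey]) :=
    (hp.getElem (by simp [pvKey])).symm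
  rw [List.getElem_drop] at hg
  refine ⟨hlen2, ?_⟩
  rw [getElem!_pos src (i+14) hlen2]
  simpa [pvKey] using hg

-- one copied character: loopA at i versus loopA at i+1, same fuel
theorem loopA_step (src : List Char) (f i : Nat) (hi : i < src.length)
    (hk : ¬ pvKey <+: src.drop i) :
    loopA src (f+1) i = (loopA src (f+1) (i+1)).map (fun r => src[i]! :: r) := by
  by_cases hi1 : i + 1 < src.length
  · have hstep := findFrom_step src i hi hk
    rw [loopA, loopA, if_pos hi, if_pos hi1]
    rw [hstep]
    by_cases hj : PySem.Chars.findFrom src pvKey ((i+1 : Nat) : Int) none = -1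
    · rw [hj]
      rw [List.drop_eq_getElem_cons hi]
      simp [getElem!_pos src i hi]
    · rw [if_neg hj, if_neg hj]
      obtain ⟨hs1, hs2, hs3⟩ := PySem.Chars.findFrom_natCast_spec src pvKey (i+1) (by omega) hj
      set j := PySem.Chars.findFrom src pvKey ((i+1 : Nat) : Int) with hjdef
      have hji : i + 1 ≤ j.toNat := by omega
      have hpre : (src.drop i).take (j.toNat - i)
          = src[i]! :: (src.drop (i+1)).take (j.toNat - (i+1)) := by
        rw [List.drop_eq_getElem_cons hi]
        have h5 : j.toNat - i = (j.toNat - (i+1)) + 1 := by omega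
        rw [h5, List.take_succ_cons, getElem!_pos src i hi]
      cases hE1 : extractBraced src (j.toNat + 15 - 1) with
      | none => simp
      | some tp =>
        obtain ⟨title, p1⟩ := tp
        by_cases h2 : p1 < src.length ∧ src[p1]! = '{'
        · simp only [if_pos h2]
          cases hE3 : extractBraced src p1 with
          | none => simp
          | some tp2 =>
            obtain ⟨inner, p2⟩ := tp2
            cases hL : loopA src f p2 <;> simp [hL, hpre]
        · simp only [if_neg h2, Option.map_none]
  · have hlen : i + 1 = src.length := by omega
    have hnf : PySem.Chars.findFrom src pvKey (i : Int) none = -1 := by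
      rw [PySem.Chars.findFrom_natCast_eq_neg_one_iff src pvKey i (by omega)]
      intro hin
      have hl := hin.length_le
      simp [pvKey] at hl
      omega
    rw [loopA, loopA, if_pos hi, if_neg hi1]
    rw [hnf]
    have hdrop : src.drop i = [src[i]] := by
      rw [List.drop_eq_getElem_cons hi]
      have : src.drop (i+1) = [] := by
        rw [List.drop_eq_nil_iff]
        omega
      rw [this]
    simp [hdrop, getElem!_pos src i hi]

-- the two loops agree whenever both have enough fuel for the remaining suffix
theorem loopA_eq_loopB (src : List Char) :
    ∀ (n i fA fB : Nat), src.length - i ≤ n → src.length - i < fA → src.length - i < fB →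
      loopA src fA i = loopB src fB i := by
  intro n
  induction n with
  | zero =>
    intro i fA fB hle hfA hfB
    have hni : ¬ i < src.length := by omega
    obtain ⟨fA', rfl⟩ : ∃ k, fA = k + 1 := ⟨fA - 1, by omega⟩
    obtain ⟨fB', rfl⟩ : ∃ k, fB = k + 1 := ⟨fB - 1, by omega⟩
    rw [loopA, loopB, if_neg hni, if_neg hni]
  | succ n ih =>
    intro i fA fB hle hfA hfB
    obtain ⟨fA', rfl⟩ : ∃ k, fA = k + 1 := ⟨fA - 1, by omega⟩
    obtain ⟨fB', rfl⟩ : ∃ k, fB = k + 1 := ⟨fB - 1, by omega⟩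
    by_cases hi : i < src.length
    · by_cases hk : pvKey.isPrefixOf (src.drop i) = true
      · have hp : pvKey <+: src.drop i := List.isPrefixOf_iff_prefix.mp hk
        obtain ⟨hb, hbc⟩ := prefix_head_brace src i hk
        have hfind := findFrom_at src i (by omega) hp
        rw [loopA, loopB, if_pos hi, if_pos hi, hk, if_pos rfl]
        rw [hfind]
        have hne : ((i : Int)) ≠ -1 := by omega
        rw [if_neg hne]
        simp only [Int.toNat_natCast]
        have h14 : i + 15 - 1 = i + 14 := by omega
        rw [h14, extractBraced_eq_capture src (i+14) hb hbc]
        have h15 : i + 14 + 1 = i + 15 := by omega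
        rw [h15]
        cases hc1 : captureLoop src (src.length + 1) (i+15) 1 [] with
        | none => rfl
        | some tp =>
          obtain ⟨title, p1⟩ := tp
          by_cases h2 : p1 < src.length ∧ src[p1]! = '{'
          · simp only [if_pos h2]
            rw [extractBraced_eq_capture src p1 h2.1 h2.2]
            cases hc2 : captureLoop src (src.length + 1) (p1+1) 1 [] with
            | none => rfl
            | some tp2 =>
              obtain ⟨inner, p2⟩ := tp2
              have hcb1 : i + 15 ≤ p1 ∧ p1 < src.length + 1 := by
                have := cap_ext src (src.length + 1) (i+15) 1 []
                rw [hc1] at this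
                cases h' : extractLoop src (src.length + 1) (i+15) 1 with
                | none => rw [h'] at this; simp at this
                | some i' =>
                  rw [h'] at this
                  have hb' := extractLoop_bounds src (src.length + 1) (i+15) 1 i' h'
                  simp at this
                  omega
              have hcb2 : p1 + 1 ≤ p2 ∧ p2 < src.length + 1 := by
                have := cap_ext src (src.length + 1) (p1+1) 1 []
                rw [hc2] at this
                cases h' : extractLoop src (src.length + 1) (p1+1) 1 with
                | none => rw [h'] at this; simp at this
                | some i' =>
                  rw [h'] at this
                  have hb' := extractLoop_bounds src (src.length + 1) (p1+1) 1 i' h'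
                  simp at this
                  omega
              have hIH := ih p2 fA' fB' (by omega) (by omega) (by omega)
              simp only [hIH]
              cases hL : loopB src fB' p2 with
              | none => rfl
              | some rest => simp
          · simp only [if_neg h2]
      · have hknp : ¬ pvKey <+: src.drop i := fun h => hk (List.isPrefixOf_iff_prefix.mpr h)
        rw [loopA_step src fA' i hi hknp, ih (i+1) (fA'+1) fB' (by omega) (by omega) (by omega)]
        rw [loopB, if_pos hi]
        simp only [hk, Bool.false_eq_true, if_false]
        cases hL : loopB src fB' (i+1) with
        | none => rfl
        | some rest => simp
    · rw [loopA, loopB, if_neg hi, if_neg hi]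

-- ===== VERDICT (by name: the statement is the Claim_ definition above) =====
theorem replace_abbreviations_mdpi_spec : Claim_equal_replace_abbreviations_mdpi := by
  intro body _ _
  unfold Spec_replace_abbreviations_mdpi replace_abbreviations_mdpi replace_abbreviations_mdpi_alt
  rw [loopA_eq_loopB body.toList (body.toList.length) 0 (body.toList.length + 1)
        (body.toList.length + 1) (by omega) (by omega) (by omega)]
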